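-- pv_equiv track=rewrite | github.com/Shiyu-Lu/Courseworks | Math Modeling & Computer Application Contest/chooosegrid.py | choosegrid_decreasing
-- ===== SOURCE A (Python) =====
-- import math
--
-- def choosegrid_decreasing(tovprice_ii,Lastprice_ii):
--     gridnum = int(abs(tovprice_ii/10))
--     if gridnum==0:
--         gridnum=1
--     #flag2 = abs(tovprice_ii+1)/(tovprice_ii+1) #防止除以0
--     grid,grid2 = [],[]
--     prim = 1
--
--     if gridnum<10:
--         pass
--     elif 20>abs(gridnum)>=10:
--         gridnum = int(math.floor(gridnum/2))
--         prim = 2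
--     elif 40>abs(gridnum)>=20:
--         gridnum = int(math.floor(gridnum/4))
--         prim = 4
--     elif 80>abs(gridnum)>=40:
--         gridnum = int(math.floor(gridnum/8))
--         prim = 8
--     else:
--         print ("too much change")
--         return [[],[]]
--     grid.append(0)
--     grid2.append(Lastprice_ii)
--
--     for n in range(1,gridnum+1):
--         grid.append(grid[n-1]+10*prim)
--         grid2.append(grid[n-1]+10*prim)
--     if len(grid)>2:
--         if grid[gridnum] != tovprice_ii:
--             grid[gridnum] = -tovprice_ii
--             grid2[gridnum] = Lastprice_ii-tovprice_ii
--
--     return [grid,grid2]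
-- ===== SOURCE B (Python) =====
-- def _ramp(step, n):
--     # [step*0, step*1, ..., step*(n-1)], built by recursion on n
--     return [] if n == 0 else _ramp(step, n - 1) + [step * (n - 1)]
--
--
-- def _build(tovprice_ii, Lastprice_ii, prim, g):
--     step = 10 * prim
--     adjust = g >= 2 and step * g != tovprice_ii
--     body = _ramp(step, g)
--     top = -tovprice_ii if adjust else step * g
--     top2 = Lastprice_ii - tovprice_ii if adjust else step * g
--     return [body + [top], [Lastprice_ii] + body[1:] + [top2]]
--
--
-- def choosegrid_decreasing(tovprice_ii, Lastprice_ii):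
--     g = int(abs(tovprice_ii / 10))
--     if g == 0:
--         g = 1
--     prim = 1
--     # iterative halving replaces the 10/20/40/80 branch chain
--     while g >= 10:
--         g //= 2
--         prim *= 2
--     if prim > 8:
--         print("too much change")
--         return [[], []]
--     return _build(tovprice_ii, Lastprice_ii, prim, g)
-- ===== Notes on version B (the rewrite author's own statement) =====
-- stated objective: alternative
-- what changed: The 10/20/40/80 branch chain is replaced by an iterative halving loop (g //= 2, prim *= 2 until g < 10, abort if prim > 8), and the forward accumulator loop plus post-mutation of grid[gridnum]/grid2[gridnum] is replaced by a recursive back-to-front ramp [step*0..step*(g-1)] with the top cell and grid2's head decided up front, so the lists are assembled once and never mutated.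
import Mathlib
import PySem

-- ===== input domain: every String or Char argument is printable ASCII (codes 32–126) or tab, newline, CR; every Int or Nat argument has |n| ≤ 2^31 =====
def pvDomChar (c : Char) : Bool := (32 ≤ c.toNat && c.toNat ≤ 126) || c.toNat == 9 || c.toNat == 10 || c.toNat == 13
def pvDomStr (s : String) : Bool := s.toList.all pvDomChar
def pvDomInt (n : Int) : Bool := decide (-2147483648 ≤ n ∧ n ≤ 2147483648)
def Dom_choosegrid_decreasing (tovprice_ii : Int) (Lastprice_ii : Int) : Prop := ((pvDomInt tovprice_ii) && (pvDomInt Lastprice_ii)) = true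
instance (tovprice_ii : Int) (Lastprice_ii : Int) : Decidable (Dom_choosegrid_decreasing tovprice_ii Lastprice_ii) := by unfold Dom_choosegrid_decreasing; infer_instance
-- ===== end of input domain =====

-- B replaces A's branch chain + forward accumulator loop (each cell = previous cell + 10*prim,
-- then a post-mutation) by an iterative-halving loop for prim and a recursive back-to-front
-- construction with the top cell decided up front; objective: alternative decomposition.
-- The 'too much change' print of the Python is a side effect not modelled here
-- (both Pythons perform it identically).

-- ===== PORT A =====
-- int(abs(tovprice_ii/10)) : exact-float argument |t| ≤ 2^31 makes this |t| // 10 (the float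
-- quotient never rounds across an integer boundary for |t| ≤ 2^31).
-- The for-loop appends grid[n-1] + 10*prim; grid[n-1] is read with pyGet? (always in range
-- on reachable states, so the .getD 0 default is never taken).
def pvStepA (prim : Int) (st : List Int × List Int) (n : Int) : List Int × List Int :=
  let v := (PySem.List.pyGet? st.1 (n - 1)).getD 0 + 10 * prim
  (st.1 ++ [v], st.2 ++ [v])

def pvCoreA (tovprice_ii Lastprice_ii prim : Int) (gridnum : Nat) : List (List Int) :=
  let st := (PySem.List.pyRange 1 ((gridnum : Int) + 1) 1).foldl (pvStepA prim)
      ([0], [Lastprice_ii])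
  let grid := st.1
  let grid2 := st.2
  if grid.length > 2 then
    if (PySem.List.pyGet? grid (gridnum : Int)).getD 0 ≠ tovprice_ii then
      -- grid[gridnum] = -tov ; grid2[gridnum] = Last - tov (index gridnum < length = gridnum+1)
      [grid.set gridnum (-tovprice_ii), grid2.set gridnum (Lastprice_ii - tovprice_ii)]
    else [grid, grid2]
  else [grid, grid2]

def choosegrid_decreasing (tovprice_ii : Int) (Lastprice_ii : Int) : List (List Int) :=
  let g0 : Nat := tovprice_ii.natAbs / 10
  let g1 : Nat := if g0 = 0 then 1 else g0
  if g1 < 10 then pvCoreA tovprice_ii Lastprice_ii 1 g1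
  else if g1 < 20 then pvCoreA tovprice_ii Lastprice_ii 2 (g1 / 2)
  else if g1 < 40 then pvCoreA tovprice_ii Lastprice_ii 4 (g1 / 4)
  else if g1 < 80 then pvCoreA tovprice_ii Lastprice_ii 8 (g1 / 8)
  else [[], []]  -- prints "too much change" in Python

-- ===== PORT B =====
-- _ramp(step, n) = [step*0, ..., step*(n-1)], recursion on n (back-to-front construction)
def pvRamp (step : Int) : Nat → List Int
  | 0 => []
  | n + 1 => pvRamp step n ++ [step * (n : Int)]

-- the 'while g >= 10: g //= 2; prim *= 2' loop of Source B
def pvHalve (g : Nat) (prim : Nat) : Nat × Nat :=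
  if 10 ≤ g then pvHalve (g / 2) (prim * 2) else (g, prim)
termination_by g
decreasing_by exact Nat.div_lt_self (by omega) (by omega)

-- _build: top cell decided up front, lists assembled once, no post-mutation
def pvBuildB (tovprice_ii Lastprice_ii : Int) (prim g : Nat) : List (List Int) :=
  let step : Int := 10 * (prim : Int)
  let adjust : Prop := 2 ≤ g ∧ step * (g : Int) ≠ tovprice_ii
  let body := pvRamp step g
  let top := if adjust then -tovprice_ii else step * (g : Int)
  let top2 := if adjust then Lastprice_ii - tovprice_ii else step * (g : Int)
  [body ++ [top], (Lastprice_ii :: body.drop 1) ++ [top2]]  -- body[1:] = body.drop 1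

def choosegrid_decreasing_alt (tovprice_ii : Int) (Lastprice_ii : Int) : List (List Int) :=
  let g0 : Nat := tovprice_ii.natAbs / 10
  let g1 : Nat := if g0 = 0 then 1 else g0
  let gp := pvHalve g1 1
  if 8 < gp.2 then [[], []]  -- prints "too much change" in Python
  else pvBuildB tovprice_ii Lastprice_ii gp.2 gp.1

-- ===== PRECONDITION & SPEC =====
def Spec_choosegrid_decreasing (tovprice_ii : Int) (Lastprice_ii : Int) (out : List (List Int)) : Prop := out = choosegrid_decreasing_alt tovprice_ii Lastprice_ii
instance (tovprice_ii : Int) (Lastprice_ii : Int) (out : List (List Int)) : Decidable (Spec_choosegrid_decreasing tovprice_ii Lastprice_ii out) := by unfold Spec_choosegrid_decreasing; infer_instance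

-- ===== CLAIM (what is proved, stated in full; the proofs are below) =====
def Claim_equal_choosegrid_decreasing : Prop := ∀ (tovprice_ii : Int) (Lastprice_ii : Int), Dom_choosegrid_decreasing tovprice_ii Lastprice_ii → Spec_choosegrid_decreasing tovprice_ii Lastprice_ii (choosegrid_decreasing tovprice_ii Lastprice_ii)

-- ===== LEMMAS AND PROOFS =====

lemma pvRamp_length (step : Int) (n : Nat) : (pvRamp step n).length = n := by
  induction n with
  | zero => rfl
  | succ n ih => simp [pvRamp, ih]

lemma pvRamp_concat_get (s : Int) (n : Nat) :
    PySem.List.pyGet? (pvRamp s n ++ [s * (n : Int)]) ((n : Int)) = some (s * n) := by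
  rw [PySem.List.pyGet?_natCast]
  have h : (pvRamp s n ++ [s * (n : Int)])[(pvRamp s n).length]? = some (s * (n : Int)) :=
    List.getElem?_concat_length
  rwa [pvRamp_length] at h

-- Loop invariant: A's fold produces B's ramp plus the unadjusted top cell
lemma pvLoop_eq (prim L : Int) (g : Nat) :
    (PySem.List.pyRange 1 ((g : Int) + 1) 1).foldl (pvStepA prim) ([0], [L])
      = (pvRamp (10 * prim) g ++ [10 * prim * (g : Int)],
          L :: (pvRamp (10 * prim) g ++ [10 * prim * (g : Int)]).drop 1) := by
  induction g with
  | zero =>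
      rw [PySem.List.pyRange_one_eq_nil (by norm_num)]
      simp [pvRamp]
  | succ g ih =>
      have h : ((g : Nat) + 1 : Nat) + (1 : Int) = ((g : Int) + 1) + 1 := by push_cast; ring
      rw [h, PySem.List.pyRange_one_succ_right (by omega), List.foldl_append, ih]
      show pvStepA prim
          (pvRamp (10 * prim) g ++ [10 * prim * (g : Int)],
            L :: (pvRamp (10 * prim) g ++ [10 * prim * (g : Int)]).drop 1)
          ((g : Int) + 1) = _
      unfold pvStepA
      have hget : PySem.List.pyGet? (pvRamp (10 * prim) g ++ [10 * prim * (g : Int)])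
          (((g : Int) + 1) - 1) = some (10 * prim * g) := by
        simpa using pvRamp_concat_get (10 * prim) g
      rw [hget]
      have hv : (10 * prim * (g : Int)) + 10 * prim = 10 * prim * ((g : Int) + 1) := by ring
      have hramp : pvRamp (10 * prim) (g + 1) = pvRamp (10 * prim) g ++ [10 * prim * (g : Int)] := by
        simp [pvRamp]
      simp only [Option.getD_some, hv, hramp]
      refine Prod.ext ?_ ?_
      · push_cast; simp
      · push_cast
        rw [List.drop_append_of_le_length
          (by simp only [List.length_append, pvRamp_length, List.length_cons, List.length_nil]; omega
            : (1:Nat) ≤ (pvRamp (10 * prim) g ++ [10 * prim * (g : Int)]).length)]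
        simp

lemma pvSet_concat (l : List Int) (a b : Int) : (l ++ [a]).set l.length b = l ++ [b] := by
  induction l with
  | nil => rfl
  | cons x xs ih => simp [ih]

lemma pvSet_ramp (s x y : Int) (g : Nat) : (pvRamp s g ++ [x]).set g y = pvRamp s g ++ [y] := by
  have h := pvSet_concat (pvRamp s g) x y
  rwa [pvRamp_length] at h

lemma pvSet_cons_concat (L x y : Int) (d : List Int) (g : Nat) (h : d.length + 1 = g) :
    (L :: (d ++ [x])).set g y = (L :: d) ++ [y] := by
  subst h
  have h2 := pvSet_concat (L :: d) x y
  rwa [List.length_cons] at h2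

lemma pvCore_eq (t L : Int) (prim g : Nat) (hg : 1 ≤ g) :
    pvCoreA t L (prim : Int) g = pvBuildB t L prim g := by
  unfold pvCoreA pvBuildB
  rw [pvLoop_eq]
  dsimp only
  have hget := pvRamp_concat_get (10 * (prim : Int)) g
  have hlen : (pvRamp (10 * (prim : Int)) g ++ [10 * (prim : Int) * (g : Int)]).length = g + 1 := by
    simp [pvRamp_length]
  have hdrop : (pvRamp (10 * (prim : Int)) g ++ [10 * (prim : Int) * (g : Int)]).drop 1
      = (pvRamp (10 * (prim : Int)) g).drop 1 ++ [10 * (prim : Int) * (g : Int)] :=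
    List.drop_append_of_le_length (by rw [pvRamp_length]; omega)
  rw [hget, hlen]
  simp only [Option.getD_some]
  by_cases h2 : 2 ≤ g
  · by_cases hne : 10 * (prim : Int) * (g : Int) = t
    · -- top cell already equals tovprice: no adjustment on either side
      have hna : ¬ (2 ≤ g ∧ 10 * (prim : Int) * (g : Int) ≠ t) := by tauto
      rw [if_pos (by omega : g + 1 > 2), if_neg (not_not_intro hne), if_neg hna, if_neg hna, hdrop]
      simp
    · have hadj : (2 ≤ g ∧ 10 * (prim : Int) * (g : Int) ≠ t) := ⟨h2, hne⟩
      rw [if_pos (by omega : g + 1 > 2), if_pos hne, if_pos hadj, if_pos hadj, hdrop,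
        pvSet_ramp,
        pvSet_cons_concat L _ _ _ g (by simp [pvRamp_length]; omega)]
  · -- g = 1: lengths are 2, no adjustment on either side
    have hna : ¬ (2 ≤ g ∧ 10 * (prim : Int) * (g : Int) ≠ t) := by omega
    rw [if_neg (by omega : ¬ g + 1 > 2), if_neg hna, if_neg hna, hdrop]
    simp

lemma pvHalve_lt (g p : Nat) (h : g < 10) : pvHalve g p = (g, p) := by
  rw [pvHalve]; simp [Nat.not_le.2 h]

lemma pvHalve_ge (g p : Nat) (h : 10 ≤ g) : pvHalve g p = pvHalve (g / 2) (p * 2) := by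
  rw [pvHalve]; simp [h]

lemma pvHalve_eq2 (g : Nat) (h : 10 ≤ g) : pvHalve g 1 = pvHalve (g / 2) 2 := by
  rw [pvHalve_ge g 1 h]

lemma pvHalve_eq4 (g : Nat) (h : 20 ≤ g) : pvHalve g 1 = pvHalve (g / 4) 4 := by
  rw [pvHalve_eq2 g (by omega), pvHalve_ge (g / 2) 2 (by omega), Nat.div_div_eq_div_mul]

lemma pvHalve_eq8 (g : Nat) (h : 40 ≤ g) : pvHalve g 1 = pvHalve (g / 8) 8 := by
  rw [pvHalve_eq4 g (by omega), pvHalve_ge (g / 4) 4 (by omega), Nat.div_div_eq_div_mul]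

lemma pvHalve_eq16 (g : Nat) (h : 80 ≤ g) : pvHalve g 1 = pvHalve (g / 16) 16 := by
  rw [pvHalve_eq8 g (by omega), pvHalve_ge (g / 8) 8 (by omega), Nat.div_div_eq_div_mul]

lemma pvHalve_prim_le (g : Nat) : ∀ p, p ≤ (pvHalve g p).2 := by
  induction g using Nat.strong_induction_on with
  | _ g ih =>
    intro p
    by_cases h : 10 ≤ g
    · rw [pvHalve_ge g p h]
      have := ih (g / 2) (Nat.div_lt_self (by omega) (by omega)) (p * 2)
      omega
    · rw [pvHalve_lt g p (by omega)]

-- ===== VERDICT (by name: the statement is the Claim_ definition above) =====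
theorem choosegrid_decreasing_spec : Claim_equal_choosegrid_decreasing := by
  intro t L _
  unfold Spec_choosegrid_decreasing
  show choosegrid_decreasing t L = choosegrid_decreasing_alt t L
  simp only [choosegrid_decreasing, choosegrid_decreasing_alt]
  have hgen : ∀ (g0 : Nat), 1 ≤ (if g0 = 0 then 1 else g0) := by intro g0; split <;> omega
  generalize hg : (if t.natAbs / 10 = 0 then 1 else t.natAbs / 10 : Nat) = g1
  have hg1pos : 1 ≤ g1 := hg ▸ hgen (t.natAbs / 10)
  by_cases h10 : g1 < 10
  · rw [pvHalve_lt g1 1 h10, if_neg (by omega : ¬ (8:Nat) < 1), if_pos h10]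
    exact pvCore_eq t L 1 g1 hg1pos
  · by_cases h20 : g1 < 20
    · rw [pvHalve_eq2 g1 (by omega), pvHalve_lt (g1 / 2) 2 (by omega),
        if_neg h10, if_pos h20, if_neg (by omega : ¬ (8:Nat) < 2)]
      exact pvCore_eq t L 2 (g1 / 2) (by omega)
    · by_cases h40 : g1 < 40
      · rw [pvHalve_eq4 g1 (by omega), pvHalve_lt (g1 / 4) 4 (by omega),
          if_neg h10, if_neg h20, if_pos h40, if_neg (by omega : ¬ (8:Nat) < 4)]
        exact pvCore_eq t L 4 (g1 / 4) (by omega)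
      · by_cases h80 : g1 < 80
        · rw [pvHalve_eq8 g1 (by omega), pvHalve_lt (g1 / 8) 8 (by omega),
            if_neg h10, if_neg h20, if_neg h40, if_pos h80, if_neg (by omega : ¬ (8:Nat) < 8)]
          exact pvCore_eq t L 8 (g1 / 8) (by omega)
        · -- g1 ≥ 80: A prints and returns [[],[]]; B's prim exceeds 8
          have h16 : 16 ≤ (pvHalve g1 1).2 := by
            rw [pvHalve_eq16 g1 (by omega)]; exact pvHalve_prim_le (g1 / 16) 16
          rw [if_neg h10, if_neg h20, if_neg h40, if_neg h80,
            if_pos (by omega : (8:Nat) < (pvHalve g1 1).2)]
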